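-- pv_equiv track=rewrite | github.com/russodanielp/biomath | PeripheralModelFiles/python_scripts/make_s_matrix_from_odes.py | clean_up_equations
-- ===== SOURCE A (Python) =====
-- def clean_up_equations(equation):
--     """ cleans up the right hand portion of the text from an ODE"""
--     # first remove unnecessary characters
--     for char in [';', '(', ')']:
--         equation = equation.replace(char, '')
--
--     new_equation = []
--     old_equation = equation.strip().split(' ')
--
--     for term in old_equation:
--         if term in ['+', '-']:
--             new_equation.append(' ' + term)
--         else:
--             new_equation.append(term)
--     return [term.replace('+', '') for term in ''.join(new_equation).split(' ')]
-- ===== SOURCE B (Python) =====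
-- def clean_up_equations(equation):
--     """One right-to-left pass over the tokens: strips '+' from each token as it
--     is absorbed, prepends it onto the current segment, and starts a fresh
--     segment at each operator token - no join/re-split and no final replace pass."""
--     cleaned = ''.join(c for c in equation if c not in ';()')
--     cur, segs = '', []
--     for tok in reversed(cleaned.strip().split(' ')):
--         t = ''.join(c for c in tok if c != '+')
--         if tok in ('+', '-'):
--             segs = [t + cur] + segs
--             cur = ''
--         else:
--             cur = t + cur
--     return [cur] + segs
-- ===== Notes on version B (the rewrite author's own statement) =====
-- stated objective: alternative
-- what changed: B replaces A's three replace passes, space-marker encoding, join and re-split, and final per-term '+'-replace by one character filter for the cleanup and one right-to-left pass over the tokens that builds the grouped segments directly ('+' stripped as each token is absorbed), so the join/re-split and the final replace pass disappear.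
import Mathlib
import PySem

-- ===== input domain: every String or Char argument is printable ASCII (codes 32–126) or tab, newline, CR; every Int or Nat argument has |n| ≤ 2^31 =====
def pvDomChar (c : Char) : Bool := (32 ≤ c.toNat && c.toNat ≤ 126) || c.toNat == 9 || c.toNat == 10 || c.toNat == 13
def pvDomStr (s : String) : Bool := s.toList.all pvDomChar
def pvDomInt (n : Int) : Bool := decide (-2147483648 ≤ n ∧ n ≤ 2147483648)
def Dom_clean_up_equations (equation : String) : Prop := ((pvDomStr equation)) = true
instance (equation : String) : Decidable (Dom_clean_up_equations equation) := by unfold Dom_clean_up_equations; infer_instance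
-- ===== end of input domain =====

-- B builds the grouped terms in one right-to-left token pass (cleanup as a single
-- character filter, '+' stripped per token) instead of A's replace chain,
-- space-marker/join/re-split and final replace pass (objective: alternative).

-- ===== PORT A =====
-- for char in [';','(',')']: equation = equation.replace(char,'');
-- old = equation.strip().split(' '); mark ops with a leading space, join, re-split, strip '+'.
def clean_up_equations (equation : String) : List String :=
  let equation := PySem.Str.replace (PySem.Str.replace (PySem.Str.replace equation ";" "") "(" "") ")" ""
  let old_equation := PySem.Chars.splitOn (PySem.Str.strip equation).toList [' ']
  let new_equation := old_equation.foldl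
    (fun acc term => if term = ['+'] ∨ term = ['-'] then acc ++ [' ' :: term] else acc ++ [term]) []
  (PySem.Chars.splitOn (PySem.Chars.join [] new_equation) [' ']).map
    (fun term => String.ofList (PySem.Chars.replace term ['+'] []))

-- ===== PORT B =====
-- cleaned = filter of the unwanted chars; then one reversed loop over the tokens
-- with state (cur, segs): an operator token closes a segment, any other token is
-- prepended onto cur, '+' stripped from each token as it is absorbed.
def clean_up_equations_alt (equation : String) : List String :=
  let cleaned := equation.toList.filter (fun c => !(c == ';' || c == '(' || c == ')'))
  let tokens := PySem.Chars.splitOn (PySem.Chars.strip cleaned) [' ']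
  let p := tokens.foldr
    (fun tok st =>
      let t := tok.filter (fun c => !(c == '+'))
      if tok = ['+'] ∨ tok = ['-'] then (([] : List Char), (t ++ st.1) :: st.2)
      else (t ++ st.1, st.2)) (([] : List Char), ([] : List (List Char)))
  (p.1 :: p.2).map String.ofList

-- ===== PRECONDITION & SPEC =====
def Spec_clean_up_equations (equation : String) (out : List String) : Prop := out = clean_up_equations_alt equation
instance (equation : String) (out : List String) : Decidable (Spec_clean_up_equations equation out) := by unfold Spec_clean_up_equations; infer_instance

-- ===== CLAIM (what is proved, stated in full; the proofs are below) =====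
def Claim_equal_clean_up_equations : Prop := ∀ (equation : String), Dom_clean_up_equations equation → Spec_clean_up_equations equation (clean_up_equations equation)

-- ===== LEMMAS AND PROOFS =====

theorem splitOn_cons (a c : Char) (l : List Char) :
    (a :: l).splitOn c = if a = c then [] :: l.splitOn c else (l.splitOn c).modifyHead (a :: ·) := by
  simp only [List.splitOn, List.splitOnP_cons, beq_iff_eq]

theorem splitOn_go_char (c : Char) : ∀ (fuel : Nat) (l cur : List Char) (acc : List (List Char)),
    l.length ≤ fuel →
    PySem.Chars.splitOn.go [c] fuel l cur acc
      = acc.reverse ++ (l.splitOn c).modifyHead (cur.reverse ++ ·) := by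
  intro fuel
  induction fuel with
  | zero =>
    intro l cur acc h
    have : l = [] := List.eq_nil_of_length_eq_zero (Nat.le_zero.mp h)
    subst this
    simp [PySem.Chars.splitOn.go, List.splitOn_nil]
  | succ n ih =>
    intro l cur acc h
    cases l with
    | nil => simp [PySem.Chars.splitOn.go, List.splitOn_nil]
    | cons a rest =>
      rw [PySem.Chars.splitOn.go]
      by_cases hac : a = c
      · subst hac
        have hp : List.isPrefixOf [a] (a :: rest) = true := by simp [List.isPrefixOf]
        rw [if_pos hp]
        rw [ih _ _ _ (by simpa using h)]
        obtain ⟨hd, tl, h'⟩ := List.exists_cons_of_ne_nil (show rest.splitOn a ≠ [] from List.splitOnP_ne_nil _ _)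
        simp [splitOn_cons, List.modifyHead, h']
      · have hp : List.isPrefixOf [c] (a :: rest) = false := by
          simp [List.isPrefixOf]; exact fun h' => (hac h'.symm).elim
        rw [if_neg (by simp [hp])]
        rw [ih _ _ _ (by simpa using h)]
        rw [splitOn_cons, if_neg hac]
        obtain ⟨hd, tl, h'⟩ := List.exists_cons_of_ne_nil (show rest.splitOn c ≠ [] from List.splitOnP_ne_nil _ _)
        simp [h', List.modifyHead]

theorem splitOn_char (cs : List Char) (c : Char) :
    PySem.Chars.splitOn cs [c] = cs.splitOn c := by
  unfold PySem.Chars.splitOn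
  rw [splitOn_go_char c (cs.length + 1) cs [] [] (by omega)]
  obtain ⟨hd, tl, h'⟩ := List.exists_cons_of_ne_nil (show cs.splitOn c ≠ [] from List.splitOnP_ne_nil _ _)
  simp [h', List.modifyHead]

theorem not_mem_splitOn (c : Char) : ∀ (cs : List Char), ∀ t ∈ cs.splitOn c, c ∉ t := by
  intro cs
  induction cs with
  | nil => intro t ht; simp [List.splitOn_nil] at ht; simp [ht]
  | cons a l ih =>
    intro t ht
    rw [splitOn_cons] at ht
    by_cases hac : a = c
    · rw [if_pos hac] at ht
      rcases List.mem_cons.mp ht with h | h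
      · simp [h]
      · exact ih t h
    · rw [if_neg hac] at ht
      obtain ⟨hd, tl, h'⟩ := List.exists_cons_of_ne_nil (show l.splitOn c ≠ [] from List.splitOnP_ne_nil _ _)
      rw [h'] at ht
      simp [List.modifyHead] at ht
      rcases ht with h | h
      · subst h
        have := ih hd (by rw [h']; exact List.mem_cons_self ..)
        simp [this]; exact fun e => hac e.symm
      · exact ih t (by rw [h']; exact List.mem_cons_of_mem _ h)

-- prepending separator-free text lands entirely in the first piece
theorem splitOn_prepend (c : Char) (t : List Char) (h : c ∉ t) : ∀ (l : List Char),
    (t ++ l).splitOn c = (l.splitOn c).modifyHead (t ++ ·) := by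
  induction t with
  | nil =>
    intro l
    obtain ⟨hd, tl, h'⟩ := List.exists_cons_of_ne_nil (show l.splitOn c ≠ [] from List.splitOnP_ne_nil _ _)
    simp [h', List.modifyHead]
  | cons a t ih =>
    intro l
    have hac : a ≠ c := fun e => h (by simp [e])
    rw [List.cons_append, splitOn_cons, if_neg hac, ih (fun hc => h (List.mem_cons_of_mem _ hc))]
    obtain ⟨hd, tl, h'⟩ := List.exists_cons_of_ne_nil (show l.splitOn c ≠ [] from List.splitOnP_ne_nil _ _)
    simp [h', List.modifyHead]

theorem join_nil_eq_flatten (ps : List (List Char)) : PySem.Chars.join [] ps = ps.flatten := by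
  unfold PySem.Chars.join
  induction ps with
  | nil => rfl
  | cons p ps ih =>
    cases ps with
    | nil => simp [List.intercalate]
    | cons q qs =>
      rw [List.flatten_cons, ← ih]
      simp [List.intercalate, List.intersperse]

-- A's marking loop as a map
theorem foldl_mark_eq_map (ts : List (List Char)) :
    ∀ acc, ts.foldl (fun acc term => if term = ['+'] ∨ term = ['-'] then acc ++ [' ' :: term] else acc ++ [term]) acc
      = acc ++ ts.map (fun t => if t = ['+'] ∨ t = ['-'] then ' ' :: t else t) := by
  induction ts with
  | nil => simp
  | cons t ts ih =>
    intro acc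
    rw [List.foldl_cons, List.map_cons]
    by_cases hop : t = ['+'] ∨ t = ['-']
    · rw [if_pos hop, if_pos hop, ih]; simp
    · rw [if_neg hop, if_neg hop, ih]; simp

-- replacing a single character by the empty string is a filter
theorem replace_go_single (c : Char) : ∀ (fuel : Nat) (l acc : List Char), l.length ≤ fuel →
    PySem.Chars.replace.go [c] [] fuel l acc = acc.reverse ++ l.filter (fun a => !(a == c)) := by
  intro fuel
  induction fuel with
  | zero =>
    intro l acc h
    have : l = [] := List.eq_nil_of_length_eq_zero (Nat.le_zero.mp h)
    subst this
    simp [PySem.Chars.replace.go]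
  | succ n ih =>
    intro l acc h
    cases l with
    | nil => simp [PySem.Chars.replace.go]
    | cons a rest =>
      rw [PySem.Chars.replace.go]
      by_cases hac : a = c
      · subst hac
        have hp : List.isPrefixOf [a] (a :: rest) = true := by simp [List.isPrefixOf]
        rw [if_pos hp]
        simp only [List.length_cons, List.drop_succ_cons, List.reverse_nil,
          List.nil_append]
        rw [ih _ _ (by simpa using h)]
        simp
      · have hp : List.isPrefixOf [c] (a :: rest) = false := by
          simp [List.isPrefixOf]; exact fun h' => (hac h'.symm).elim
        rw [if_neg (by simp [hp])]
        rw [ih _ _ (by simpa using h)]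
        simp [hac]

theorem replace_single_empty (l : List Char) (c : Char) :
    PySem.Chars.replace l [c] [] = l.filter (fun a => !(a == c)) := by
  unfold PySem.Chars.replace
  rw [if_neg (by simp)]
  rw [replace_go_single c l.length l [] (le_refl _)]
  simp

-- A's three replace passes equal B's single character filter
theorem cleanup_eq (s : List Char) :
    PySem.Chars.replace (PySem.Chars.replace (PySem.Chars.replace s [';'] []) ['('] []) [')'] []
      = s.filter (fun c => !(c == ';' || c == '(' || c == ')')) := by
  simp only [replace_single_empty, List.filter_filter]
  exact List.filter_congr (fun a _ => by cases h1 : a == ';' <;> cases h2 : a == '(' <;> cases h3 : a == ')' <;> simp [*])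

-- the heart: B's single reversed pass computes A's split of the marked join, filtered
theorem main_foldr (ts : List (List Char)) (hts : ∀ t ∈ ts, (' ' : Char) ∉ t) :
    (ts.foldr
      (fun tok st =>
        let t := tok.filter (fun c => !(c == '+'))
        if tok = ['+'] ∨ tok = ['-'] then (([] : List Char), (t ++ st.1) :: st.2)
        else (t ++ st.1, st.2)) (([] : List Char), ([] : List (List Char)))) =
    (fun r => (r.headI, r.tail))
      ((((ts.map (fun t => if t = ['+'] ∨ t = ['-'] then ' ' :: t else t)).flatten).splitOn ' ').map
        (List.filter (fun c => !(c == '+')))) := by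
  induction ts with
  | nil => simp [List.splitOn_nil]
  | cons t ts ih =>
    have ht : (' ' : Char) ∉ t := hts t (List.mem_cons_self ..)
    have hts' : ∀ u ∈ ts, (' ' : Char) ∉ u := fun u hu => hts u (List.mem_cons_of_mem _ hu)
    rw [List.foldr_cons, ih hts']
    obtain ⟨hd, tl, hr⟩ := List.exists_cons_of_ne_nil
      (show (((ts.map (fun t => if t = ['+'] ∨ t = ['-'] then ' ' :: t else t)).flatten).splitOn ' ') ≠ []
        from List.splitOnP_ne_nil _ _)
    by_cases hop : t = ['+'] ∨ t = ['-']
    · simp only [List.map_cons, if_pos hop, List.flatten_cons, List.cons_append, splitOn_cons,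
        splitOn_prepend ' ' t ht, hr]
      simp
    · simp only [List.map_cons, if_neg hop, List.flatten_cons, splitOn_prepend ' ' t ht, hr]
      simp

-- ===== VERDICT (by name: the statement is the Claim_ definition above) =====
theorem clean_up_equations_spec : Claim_equal_clean_up_equations := by
  intro equation _
  unfold Spec_clean_up_equations clean_up_equations clean_up_equations_alt
  simp only [PySem.Str.toList_replace, PySem.Str.toList_strip,
    show (";" : String).toList = [';'] from rfl, show ("(" : String).toList = ['('] from rfl,
    show (")" : String).toList = [')'] from rfl, show ("" : String).toList = [] from rfl]
  rw [cleanup_eq]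
  rw [main_foldr _ (by
    intro t ht hsp
    exact not_mem_splitOn ' ' _ t (by rwa [splitOn_char] at ht) hsp)]
  rw [foldl_mark_eq_map, List.nil_append, join_nil_eq_flatten, splitOn_char, splitOn_char]
  obtain ⟨hd, tl, hr⟩ := List.exists_cons_of_ne_nil
    (show (((((PySem.Chars.strip (List.filter (fun c => !(c == ';' || c == '(' || c == ')')) equation.toList)).splitOn ' ').map (fun t => if t = ['+'] ∨ t = ['-'] then ' ' :: t else t)).flatten).splitOn ' ') ≠ []
      from List.splitOnP_ne_nil _ _)
  rw [hr]
  simp [replace_single_empty]
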